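-- pv_equiv track=rewrite | github.com/davejbax/letmepass | scripts/password_blacklist_generator.py | gen_partitions
-- ===== SOURCE A (Python) =====
-- def get_index(word):
--     """Gets the non-unique index (for indexing) that should be used to represent a word"""
--     return (word[0], len(word))
--
-- def gen_partitions(words):
--     """Generates a dictionary of sorted word partitions by index"""
--     partitions = {}
--
--     # Add each word to its appropriate partition
--     for word in words:
--         index = get_index(word)
--         if not index in partitions:
--             partitions[index] = []
--
--         # Omit the first character as it is contained in index
--         partitions[index].append(word[1:])
--
--     # Sort each partition
--     for index in partitions:
--         partitions[index].sort()
--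
--     return partitions
-- ===== SOURCE B (Python) =====
-- def get_index(word):
--     """Gets the non-unique index (for indexing) that should be used to represent a word"""
--     return (word[0], len(word))
--
-- def gen_partitions(words):
--     """Generates a dictionary of sorted word partitions by index"""
--     # keys in first-occurrence order, as the dict's insertion order produces them
--     partitions = {get_index(w): [] for w in words}
--     # one global sort; within a (first char, length) bucket this orders the suffixes,
--     # so no per-bucket sort is needed
--     for w in sorted(words, key=lambda w: (len(w), w)):
--         partitions[get_index(w)].append(w[1:])
--     return partitions
-- ===== Notes on version B (the rewrite author's own statement) =====
-- stated objective: alternative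
-- what changed: A groups words into buckets first and then sorts each bucket; B sorts the whole list once by (len(w), w) and fills the buckets (pre-created in first-occurrence key order) in a single pass, so each bucket's suffixes arrive already sorted and no per-bucket sort is needed.
import Mathlib
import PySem

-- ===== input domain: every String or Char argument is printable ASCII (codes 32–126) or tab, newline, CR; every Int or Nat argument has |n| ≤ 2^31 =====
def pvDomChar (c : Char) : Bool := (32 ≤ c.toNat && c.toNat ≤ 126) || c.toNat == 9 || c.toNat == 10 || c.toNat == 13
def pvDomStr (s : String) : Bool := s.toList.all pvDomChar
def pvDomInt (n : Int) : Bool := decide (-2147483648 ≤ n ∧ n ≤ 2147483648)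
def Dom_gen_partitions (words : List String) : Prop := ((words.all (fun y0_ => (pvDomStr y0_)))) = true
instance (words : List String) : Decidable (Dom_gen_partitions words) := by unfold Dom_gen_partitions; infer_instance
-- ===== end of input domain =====

-- B replaces A's group-then-sort-each-bucket with one global sort by (len(w), w) followed by a single
-- grouping pass into buckets pre-created in first-occurrence key order (alternative decomposition, same cost).


-- ===== PORT A =====
-- word[0] in Python yields a ONE-CHARACTER STRING (or raises IndexError on "", excluded by Pre_);
-- PySem.Str.pyGet? gives the Char, which we wrap back into a String — exact on nonempty words.
def get_index (word : String) : String × Int :=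
  (match PySem.Str.pyGet? word 0 with
   | some c => String.ofList [c]
   | none   => "",
   PySem.Str.len word)

def gen_partitions (words : List String) : List (String × Int × List String) :=
  let partitions := words.foldl (fun d word =>
      let index := get_index word
      let d := if d.contains index then d else d.insert index ([] : List String)
      d.insert index (d.getD index [] ++ [PySem.Str.slice word (some 1) none]))
    PySem.Dict.empty
  let partitions := partitions.keys.foldl
      (fun d index => d.insert index (PySem.List.sorted (d.getD index []) (fun x => x) false))
    partitions
  partitions.items.map (fun p => (p.1.1, p.1.2, p.2))

-- ===== PORT B =====
-- B's Python defines the same get_index helper; the port shares it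
def gen_partitions_alt (words : List String) : List (String × Int × List String) :=
  let partitions := words.foldl (fun d w => d.insert (get_index w) ([] : List String)) PySem.Dict.empty
  let sortedWords := PySem.List.sorted2 words (fun w => PySem.Str.len w) (fun w => w) false
  let partitions := sortedWords.foldl
      (fun d w => d.modify (get_index w) [] (· ++ [PySem.Str.slice w (some 1) none]))
    partitions
  partitions.items.map (fun p => (p.1.1, p.1.2, p.2))

-- ===== PRECONDITION & SPEC =====
-- Pre_ excludes lists containing the empty string, on which A (and B) raise IndexError at word[0].
def Pre_gen_partitions (words : List String) : Prop := ∀ w ∈ words, w ≠ ""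
instance (words : List String) : Decidable (Pre_gen_partitions words) := by unfold Pre_gen_partitions; infer_instance
def pvWitness_gen_partitions : List String := ["ab", "b", "ac", "ab"]

def Spec_gen_partitions (words : List String) (out : List (String × Int × List String)) : Prop := out = gen_partitions_alt words
instance (words : List String) (out : List (String × Int × List String)) : Decidable (Spec_gen_partitions words out) := by unfold Spec_gen_partitions; infer_instance

-- ===== CLAIM (what is proved, stated in full; the proofs are below) =====
def Claim_equal_gen_partitions : Prop := ∀ (words : List String), Dom_gen_partitions words → Pre_gen_partitions words → Spec_gen_partitions words (gen_partitions words)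

-- ===== LEMMAS AND PROOFS =====

def pvSuf (w : String) : String := PySem.Str.slice w (some 1) none

theorem pvSuf_eq (w : String) : pvSuf w = String.ofList w.toList.tail := by
  simp [pvSuf, PySem.Str.slice, PySem.Chars.slice, PySem.List.slice_from_one]

-- A's loop body is exactly a modify
theorem stepA_eq_modify (d : PySem.Dict (String × Int) (List String)) (w : String) :
    (let index := get_index w
     let d' := if d.contains index then d else d.insert index ([] : List String)
     d'.insert index (d'.getD index [] ++ [PySem.Str.slice w (some 1) none]))
    = d.modify (get_index w) [] (· ++ [pvSuf w]) := by
  by_cases h : d.contains (get_index w)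
  · simp [h, PySem.Dict.modify, pvSuf]
  · have hfc : d.contains (get_index w) = false := by simpa using h
    simp [hfc, PySem.Dict.modify, pvSuf, PySem.Dict.getD_insert_self,
      PySem.Dict.insert_insert_self, PySem.Dict.getD_of_not_contains d [] hfc]

-- the per-key content of the grouping fold (both ports use the same shape)
theorem getD_groupFold (l : List String) (d : PySem.Dict (String × Int) (List String)) (k : String × Int) :
    (l.foldl (fun d w => d.modify (get_index w) [] (· ++ [pvSuf w])) d).getD k []
      = d.getD k [] ++ (l.filter (fun w => get_index w == k)).map pvSuf := by
  have h := PySem.Dict.getD_foldl_modify_append (l.map (fun w => (get_index w, pvSuf w))) d k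
  rw [List.foldl_map] at h
  simpa [List.filter_map, Function.comp_def, List.map_map] using h

-- A's second loop: sorting each existing key's value rewrites every item in place
theorem sortLoop_items {κ ν : Type} [BEq κ] [LawfulBEq κ] (f : ν → ν) (dflt : ν) :
    ∀ (ks : List κ) (d : PySem.Dict κ ν), d.keys.Nodup → ks.Nodup → (∀ k ∈ ks, d.contains k) →
    (ks.foldl (fun e k => e.insert k (f (e.getD k dflt))) d).items
      = d.items.map (fun p => if ks.contains p.1 then (p.1, f p.2) else p) := by
  intro ks
  induction ks with
  | nil => intro d _ _ _; simp
  | cons k ks ih =>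
    intro d hnd hkd hall
    have hc : d.contains k = true := hall k (by simp)
    have hkeys : (d.insert k (f (d.getD k dflt))).keys = d.keys :=
      PySem.Dict.keys_insert_of_contains d _ hc
    have hrec := ih (d.insert k (f (d.getD k dflt)))
      (by rw [hkeys]; exact hnd) hkd.of_cons
      (by intro k' hk'
          have := hall k' (by simp [hk'])
          rw [PySem.Dict.contains_iff_mem_keys] at this ⊢
          rw [hkeys]; exact this)
    rw [List.foldl_cons, hrec, PySem.Dict.items_insert_of_contains d _ hc, List.map_map]
    apply List.map_congr_left
    intro p hp
    have hknotin : k ∉ ks := (List.nodup_cons.1 hkd).1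
    by_cases hpk : p.1 = k
    · have : d.getD k dflt = p.2 := by
        have := PySem.Dict.getD_of_mem_items d (k := p.1) (v := p.2) hp hnd dflt
        rw [hpk] at this; exact this
      simp [Function.comp_def, hpk, this, List.contains_iff_mem, hknotin]
    · simp [Function.comp_def, hpk, List.contains_iff_mem, show (p.1 == k) = false by simpa using hpk]

-- B's first loop: every stored value is [] (so getD _ [] is [] everywhere)
theorem getD_initFold (l : List String) :
    ∀ (d : PySem.Dict (String × Int) (List String)), (∀ k, d.getD k [] = []) →
    ∀ k, (l.foldl (fun d w => d.insert (get_index w) ([] : List String)) d).getD k [] = [] := by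
  induction l with
  | nil => intro d h k; simpa using h k
  | cons w l ih =>
    intro d h k
    rw [List.foldl_cons]
    exact ih _ (by intro k'; rw [PySem.Dict.getD_insert]; split <;> simp [h]) k

-- B's sort equals a sort by the lexicographic pair key
theorem sorted2_eq_sorted_lex (xs : List String) :
    PySem.List.sorted2 xs (fun w => PySem.Str.len w) (fun w => w) false
      = PySem.List.sorted xs (fun w => toLex ((PySem.Str.len w : Int), w)) false := by
  have hb : (fun (a b : String) =>
        decide (PySem.Str.len a < PySem.Str.len b) ||
          (!decide (PySem.Str.len b < PySem.Str.len a) && decide (a < b)))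
      = (fun (a b : String) =>
        decide (toLex ((PySem.Str.len a : Int), a) < toLex ((PySem.Str.len b : Int), b))) := by
    funext a b
    rcases Nat.lt_trichotomy a.length b.length with h|h|h
    · simp [PySem.Str.len, Prod.Lex.toLex_lt_toLex, h]
    · simp [PySem.Str.len, Prod.Lex.toLex_lt_toLex, h, Nat.lt_irrefl]
    · simp [PySem.Str.len, Prod.Lex.toLex_lt_toLex, Nat.lt_asymm h, ne_of_gt h, Nat.lt_irrefl]
      intro hle
      omega
  exact congrArg (fun f => List.foldl (fun acc (x : String) => PySem.List.insertBy f x acc) ([] : List String) xs) hb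

-- equal-head strings compare by their tails
theorem le_tail_of_le {a b : String} {c : Char} {ta tb : List Char}
    (ha : a.toList = c :: ta) (hb : b.toList = c :: tb) (hle : a ≤ b) :
    String.ofList ta ≤ String.ofList tb := by
  rw [← not_lt] at hle ⊢
  intro hlt
  apply hle
  rw [String.lt_iff_toList_lt, ha, hb]
  rw [String.lt_iff_toList_lt, String.toList_ofList, String.toList_ofList] at hlt
  exact List.cons_lt_cons_self.2 hlt

-- facts about get_index on a nonempty word
theorem get_index_char {w : String} {c : Char} {t : List Char} (h : w.toList = c :: t) :
    get_index w = (String.ofList [c], (w.toList.length : Int)) := by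
  simp [get_index, PySem.Str.pyGet?, h, PySem.Str.len, PySem.Chars.pyGet?, PySem.List.pyGet?_zero_cons]

-- the bucket lemma: filtering a bucket out of the globally sorted list yields that bucket's sorted suffixes
theorem bucket_sorted (words : List String) (hpre : ∀ w ∈ words, w ≠ "") (k : String × Int) :
    ((PySem.List.sorted2 words (fun w => PySem.Str.len w) (fun w => w) false).filter
        (fun w => get_index w == k)).map pvSuf
      = PySem.List.sorted ((words.filter (fun w => get_index w == k)).map pvSuf) (fun x => x) false := by
  set S := PySem.List.sorted2 words (fun w => PySem.Str.len w) (fun w => w) false with hS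
  apply Eq.symm
  apply PySem.List.sorted_id_eq_of_perm_of_pairwise (κ := String)
  · exact (((PySem.List.sorted2_perm words (fun w => PySem.Str.len w) (fun w => w) false).filter _).map pvSuf)
  · -- pairwise ≤ of the suffixes in the filtered sorted list
    have hpw : S.Pairwise (fun a b =>
        toLex ((PySem.Str.len a : Int), a) ≤ toLex ((PySem.Str.len b : Int), b)) := by
      rw [hS, sorted2_eq_sorted_lex]
      exact PySem.List.sorted_pairwise words _
    have hmem : ∀ w ∈ S, w ∈ words := fun w hw => (PySem.List.sorted2_perm words (fun w => PySem.Str.len w) (fun w => w) false).mem_iff.1 hw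
    rw [List.pairwise_map]
    refine ((hpw.filter _).imp_of_mem ?_)
    intro a b ha hb hab
    have hka : get_index a = k := by simpa using (List.mem_filter.1 ha).2
    have hkb : get_index b = k := by simpa using (List.mem_filter.1 hb).2
    have hane : a ≠ "" := hpre a (hmem a (List.mem_filter.1 ha).1)
    have hbne : b ≠ "" := hpre b (hmem b (List.mem_filter.1 hb).1)
    obtain ⟨ca, ta, hta⟩ : ∃ c t, a.toList = c :: t := by
      cases h : a.toList with
      | nil => exact absurd (by ext1; simp [h]) hane
      | cons c t => exact ⟨c, t, rfl⟩
    obtain ⟨cb, tb, htb⟩ : ∃ c t, b.toList = c :: t := by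
      cases h : b.toList with
      | nil => exact absurd (by ext1; simp [h]) hbne
      | cons c t => exact ⟨c, t, rfl⟩
    have hia := get_index_char hta
    have hib := get_index_char htb
    have hkey : get_index a = get_index b := hka.trans hkb.symm
    rw [hia, hib] at hkey
    have hcab : ca = cb := by
      have h1 : (String.ofList [ca]) = (String.ofList [cb]) := congrArg Prod.fst hkey
      have := congrArg String.toList h1
      simpa using this
    have hlen : PySem.Str.len a = PySem.Str.len b := by
      simp [PySem.Str.len, hta, htb]
      have := congrArg Prod.snd hkey
      simpa [hta, htb] using this
    have hle : a ≤ b := by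
      rcases Prod.Lex.toLex_le_toLex.1 hab with h | ⟨_, h⟩
      · exact absurd hlen (by exact fun he => absurd (he ▸ h) (lt_irrefl _))
      · exact h
    rw [pvSuf_eq, pvSuf_eq, hta, htb, List.tail_cons, List.tail_cons]
    exact le_tail_of_le hta (hcab ▸ htb) hle

-- canonical form of port A
theorem A_eq (words : List String) :
    gen_partitions words
      = (PySem.Set.ofList (words.map get_index)).map
          (fun k => (k.1, k.2,
            PySem.List.sorted ((words.filter (fun w => get_index w == k)).map pvSuf) (fun x => x) false)) := by
  unfold gen_partitions
  have hstep : (fun (d : PySem.Dict (String × Int) (List String)) word =>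
      let index := get_index word
      let d' := if d.contains index then d else d.insert index ([] : List String)
      d'.insert index (d'.getD index [] ++ [PySem.Str.slice word (some 1) none]))
      = (fun d w => d.modify (get_index w) [] (· ++ [pvSuf w])) :=
    funext fun d => funext fun w => stepA_eq_modify d w
  rw [hstep]
  set dA := words.foldl (fun d w => d.modify (get_index w) [] (· ++ [pvSuf w])) PySem.Dict.empty with hdA
  show List.map (fun p => (p.1.1, p.1.2, p.2))
      (List.foldl (fun d index => d.insert index (PySem.List.sorted (d.getD index []) (fun x => x) false))
        dA dA.keys).items = _
  have hkeys : dA.keys = PySem.Set.ofList (words.map get_index) := by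
    rw [hdA]
    have := PySem.Dict.keys_foldl_modify_key words get_index ([] : List String)
      (fun _ w => (· ++ [pvSuf w])) PySem.Dict.empty
    simpa [PySem.Set.update_nil_left] using this
  have hnd : dA.keys.Nodup := by rw [hkeys]; exact PySem.Set.nodup_ofList _
  have hgetD : ∀ k, dA.getD k [] = (words.filter (fun w => get_index w == k)).map pvSuf := by
    intro k
    rw [hdA, getD_groupFold]
    simp
  rw [sortLoop_items (fun v => PySem.List.sorted v (fun x => x) false) ([] : List String)
      dA.keys dA hnd hnd (fun k hk => (PySem.Dict.contains_iff_mem_keys dA k).2 hk)]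
  have hmap : ∀ p ∈ dA.items,
      (if dA.keys.contains p.1 then (p.1, PySem.List.sorted p.2 (fun x => x) false) else p)
        = (p.1, PySem.List.sorted p.2 (fun x => x) false) := by
    intro p hp
    rw [if_pos (List.contains_iff_mem.2 (PySem.Dict.mem_keys_of_mem_items dA hp))]
  rw [List.map_congr_left hmap, PySem.Dict.items_eq_map_keys dA hnd ([] : List String),
    List.map_map, List.map_map, hkeys]
  apply List.map_congr_left
  intro k hk
  simp [Function.comp_def, hgetD k]

-- canonical form of port B
theorem B_eq (words : List String) (hpre : ∀ w ∈ words, w ≠ "") :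
    gen_partitions_alt words
      = (PySem.Set.ofList (words.map get_index)).map
          (fun k => (k.1, k.2,
            PySem.List.sorted ((words.filter (fun w => get_index w == k)).map pvSuf) (fun x => x) false)) := by
  unfold gen_partitions_alt
  have hsuf : (fun (d : PySem.Dict (String × Int) (List String)) w =>
      d.modify (get_index w) [] (· ++ [PySem.Str.slice w (some 1) none]))
      = (fun d w => d.modify (get_index w) [] (· ++ [pvSuf w])) := rfl
  rw [hsuf]
  set d0 := words.foldl (fun d w => d.insert (get_index w) ([] : List String)) PySem.Dict.empty with hd0
  set S := PySem.List.sorted2 words (fun w => PySem.Str.len w) (fun w => w) false with hS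
  have hperm : S.Perm words := PySem.List.sorted2_perm words (fun w => PySem.Str.len w) (fun w => w) false
  have hkeys0 : d0.keys = PySem.Set.ofList (words.map get_index) := by
    rw [hd0]
    have := PySem.Dict.keys_foldl_insert_key words get_index
      (fun _ _ => ([] : List String)) PySem.Dict.empty
    simpa [PySem.Set.update_nil_left] using this
  have hnd0 : d0.keys.Nodup := by rw [hkeys0]; exact PySem.Set.nodup_ofList _
  have hget0 : ∀ k, d0.getD k [] = [] := by
    intro k
    rw [hd0]
    exact getD_initFold words PySem.Dict.empty (by simp) k
  set dB := S.foldl (fun d w => d.modify (get_index w) [] (· ++ [pvSuf w])) d0 with hdB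
  show List.map (fun p => (p.1.1, p.1.2, p.2)) dB.items = _
  have hkeysB : dB.keys = PySem.Set.ofList (words.map get_index) := by
    rw [hdB]
    have h1 := PySem.Dict.keys_foldl_modify_key S get_index ([] : List String)
      (fun _ w => (· ++ [pvSuf w])) d0
    rw [h1, PySem.Set.update_eq_append_filter, hkeys0]
    have h2 : (PySem.Set.ofList (S.map get_index)).filter
        (fun y => !(PySem.Set.ofList (words.map get_index)).contains y) = [] := by
      rw [List.filter_eq_nil_iff]
      intro a ha
      have : a ∈ words.map get_index := by
        have := (PySem.Set.mem_ofList _ _).1 ha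
        rcases List.mem_map.1 this with ⟨w, hw, rfl⟩
        exact List.mem_map_of_mem (hperm.mem_iff.1 hw)
      simp [PySem.Set.contains_iff, PySem.Set.mem_ofList, this]
    rw [h2, List.append_nil]
  have hndB : dB.keys.Nodup := by rw [hkeysB]; exact PySem.Set.nodup_ofList _
  have hgetB : ∀ k, dB.getD k []
      = (S.filter (fun w => get_index w == k)).map pvSuf := by
    intro k
    rw [hdB, getD_groupFold, hget0 k, List.nil_append]
  rw [PySem.Dict.items_eq_map_keys dB hndB ([] : List String), List.map_map, hkeysB]
  apply List.map_congr_left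
  intro k hk
  simp only [Function.comp_def, hgetB k]
  rw [bucket_sorted words hpre k]

-- ===== VERDICT (by name: the statement is the Claim_ definition above) =====
theorem gen_partitions_spec : Claim_equal_gen_partitions := by
  intro words _ hpre
  unfold Spec_gen_partitions
  rw [A_eq words, B_eq words hpre]
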